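-- pv_equiv track=rewrite | github.com/amarfarshoukh/CNRS_Internship_Project | convert_shp_to_json.py | detect_name_field
-- ===== SOURCE A (Python) =====
-- def detect_name_field(fields):
--     # Prefer Arabic
--     for candidate in [
--         "ADM4_AR", "ADM3_AR", "ADM2_AR", "ADM1_AR", "ADM0_AR",
--         "ADM4ALT1AR", "ADM3ALT1AR", "ADM2ALT1AR", "ADM1ALT1AR", "ADM0ALT1AR",
--         "ADM4ALT2AR", "ADM3ALT2AR", "ADM2ALT2AR", "ADM1ALT2AR", "ADM0ALT2AR"
--     ]:
--         if candidate in fields: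
--             return candidate
--
--     # Fall back to English
--     for candidate in [
--         "ADM4_EN", "ADM3_EN", "ADM2_EN", "ADM1_EN", "ADM0_EN",
--         "NAME", "name", "fclass", "type"
--     ]:
--         if candidate in fields:
--             return candidate
--
--     return None
-- ===== SOURCE B (Python) =====
-- _CANDIDATES = [
--     "ADM4_AR", "ADM3_AR", "ADM2_AR", "ADM1_AR", "ADM0_AR",
--     "ADM4ALT1AR", "ADM3ALT1AR", "ADM2ALT1AR", "ADM1ALT1AR", "ADM0ALT1AR",
--     "ADM4ALT2AR", "ADM3ALT2AR", "ADM2ALT2AR", "ADM1ALT2AR", "ADM0ALT2AR",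
--     "ADM4_EN", "ADM3_EN", "ADM2_EN", "ADM1_EN", "ADM0_EN",
--     "NAME", "name", "fclass", "type",
-- ]
--
--
-- def detect_name_field(fields):
--     # Single pass over the actual fields, keeping the best (lowest) priority rank.
--     rank = {name: i for i, name in enumerate(_CANDIDATES)}
--     best = None
--     best_rank = len(_CANDIDATES)
--     for f in fields:
--         r = rank.get(f)
--         if r is not None and r < best_rank:
--             best = f
--             best_rank = r
--     return best
-- ===== Notes on version B (the rewrite author's own statement) =====
-- stated objective: alternative
-- what changed: B builds a name->priority dict once and does a single pass over the input fields keeping the running minimum rank, instead of A's scan of the 24-candidate table with a membership test over fields for each candidate.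
import Mathlib
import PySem

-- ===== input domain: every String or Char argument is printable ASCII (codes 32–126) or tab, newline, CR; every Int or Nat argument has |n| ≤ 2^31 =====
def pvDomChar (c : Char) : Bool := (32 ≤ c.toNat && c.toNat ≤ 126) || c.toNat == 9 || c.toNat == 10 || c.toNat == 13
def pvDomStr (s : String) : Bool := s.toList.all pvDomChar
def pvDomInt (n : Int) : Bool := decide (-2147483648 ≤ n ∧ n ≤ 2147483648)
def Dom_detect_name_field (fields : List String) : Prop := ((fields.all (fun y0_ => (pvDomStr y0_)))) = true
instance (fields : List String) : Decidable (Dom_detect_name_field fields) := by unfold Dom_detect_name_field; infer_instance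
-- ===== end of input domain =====

-- B replaces A's scan of the candidate table (a membership test over fields per candidate)
-- by one pass over fields keeping the running minimum priority rank from a name->rank dict.


-- ===== PORT A =====
-- 'for candidate in L: if candidate in fields: return candidate' (falls through to none)
def pvFindCand (cands : List String) (fields : List String) : Option String :=
  match cands with
  | [] => none
  | c :: cs => if fields.contains c then some c else pvFindCand cs fields

def detect_name_field (fields : List String) : Option String :=
  match pvFindCand ["ADM4_AR", "ADM3_AR", "ADM2_AR", "ADM1_AR", "ADM0_AR",
      "ADM4ALT1AR", "ADM3ALT1AR", "ADM2ALT1AR", "ADM1ALT1AR", "ADM0ALT1AR",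
      "ADM4ALT2AR", "ADM3ALT2AR", "ADM2ALT2AR", "ADM1ALT2AR", "ADM0ALT2AR"] fields with
  | some c => some c
  | none =>
    match pvFindCand ["ADM4_EN", "ADM3_EN", "ADM2_EN", "ADM1_EN", "ADM0_EN",
        "NAME", "name", "fclass", "type"] fields with
    | some c => some c
    | none => none

-- ===== PORT B =====
def pvCands : List String :=
  ["ADM4_AR", "ADM3_AR", "ADM2_AR", "ADM1_AR", "ADM0_AR",
   "ADM4ALT1AR", "ADM3ALT1AR", "ADM2ALT1AR", "ADM1ALT1AR", "ADM0ALT1AR",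
   "ADM4ALT2AR", "ADM3ALT2AR", "ADM2ALT2AR", "ADM1ALT2AR", "ADM0ALT2AR",
   "ADM4_EN", "ADM3_EN", "ADM2_EN", "ADM1_EN", "ADM0_EN",
   "NAME", "name", "fclass", "type"]

-- rank = {name: i for i, name in enumerate(_CANDIDATES)}
def pvRanks : PySem.Dict String Int :=
  PySem.Dict.ofList ((PySem.List.enumerate pvCands).map (fun p => (p.2, p.1)))

-- the body of B's for-loop: r = rank.get(f); if r is not None and r < best_rank: best, best_rank = f, r
def pvStep (st : Option String × Int) (f : String) : Option String × Int :=
  match pvRanks.get? f with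
  | none => st
  | some r => if r < st.2 then (some f, r) else st

def detect_name_field_alt (fields : List String) : Option String :=
  (fields.foldl pvStep (none, (pvCands.length : Int))).1

-- ===== PRECONDITION & SPEC =====
def Spec_detect_name_field (fields : List String) (out : Option String) : Prop := out = detect_name_field_alt fields
instance (fields : List String) (out : Option String) : Decidable (Spec_detect_name_field fields out) := by unfold Spec_detect_name_field; infer_instance

-- ===== CLAIM (what is proved, stated in full; the proofs are below) =====
def Claim_equal_detect_name_field : Prop := ∀ (fields : List String), Dom_detect_name_field fields → Spec_detect_name_field fields (detect_name_field fields)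

-- ===== LEMMAS AND PROOFS =====

-- the rank dict as a literal association list
set_option maxHeartbeats 4000000 in
theorem pvRanks_items : pvRanks.items =
  [("ADM4_AR",0), ("ADM3_AR",1), ("ADM2_AR",2), ("ADM1_AR",3), ("ADM0_AR",4),
   ("ADM4ALT1AR",5), ("ADM3ALT1AR",6), ("ADM2ALT1AR",7), ("ADM1ALT1AR",8), ("ADM0ALT1AR",9),
   ("ADM4ALT2AR",10), ("ADM3ALT2AR",11), ("ADM2ALT2AR",12), ("ADM1ALT2AR",13), ("ADM0ALT2AR",14),
   ("ADM4_EN",15), ("ADM3_EN",16), ("ADM2_EN",17), ("ADM1_EN",18), ("ADM0_EN",19),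
   ("NAME",20), ("name",21), ("fclass",22), ("type",23)] := by decide

-- a rank hit means f is the candidate at that index
set_option maxHeartbeats 1000000 in
theorem pvRanks_get?_some (f : String) (r : Int) (h : pvRanks.get? f = some r) :
    ∃ j : Nat, j < 24 ∧ r = (j : Int) ∧ pvCands[j]? = some f := by
  have hm := PySem.Dict.mem_items_of_get?_eq_some _ h
  rw [pvRanks_items] at hm
  simp only [List.mem_cons, List.not_mem_nil, or_false, Prod.mk.injEq] at hm
  rcases hm with ⟨rfl,rfl⟩|⟨rfl,rfl⟩|⟨rfl,rfl⟩|⟨rfl,rfl⟩|⟨rfl,rfl⟩|⟨rfl,rfl⟩|⟨rfl,rfl⟩|⟨rfl,rfl⟩|⟨rfl,rfl⟩|⟨rfl,rfl⟩|⟨rfl,rfl⟩|⟨rfl,rfl⟩|⟨rfl,rfl⟩|⟨rfl,rfl⟩|⟨rfl,rfl⟩|⟨rfl,rfl⟩|⟨rfl,rfl⟩|⟨rfl,rfl⟩|⟨rfl,rfl⟩|⟨rfl,rfl⟩|⟨rfl,rfl⟩|⟨rfl,rfl⟩|⟨rfl,rfl⟩|⟨rfl,rfl⟩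
  · exact ⟨0, by omega, by omega, rfl⟩
  · exact ⟨1, by omega, by omega, rfl⟩
  · exact ⟨2, by omega, by omega, rfl⟩
  · exact ⟨3, by omega, by omega, rfl⟩
  · exact ⟨4, by omega, by omega, rfl⟩
  · exact ⟨5, by omega, by omega, rfl⟩
  · exact ⟨6, by omega, by omega, rfl⟩
  · exact ⟨7, by omega, by omega, rfl⟩
  · exact ⟨8, by omega, by omega, rfl⟩
  · exact ⟨9, by omega, by omega, rfl⟩
  · exact ⟨10, by omega, by omega, rfl⟩
  · exact ⟨11, by omega, by omega, rfl⟩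
  · exact ⟨12, by omega, by omega, rfl⟩
  · exact ⟨13, by omega, by omega, rfl⟩
  · exact ⟨14, by omega, by omega, rfl⟩
  · exact ⟨15, by omega, by omega, rfl⟩
  · exact ⟨16, by omega, by omega, rfl⟩
  · exact ⟨17, by omega, by omega, rfl⟩
  · exact ⟨18, by omega, by omega, rfl⟩
  · exact ⟨19, by omega, by omega, rfl⟩
  · exact ⟨20, by omega, by omega, rfl⟩
  · exact ⟨21, by omega, by omega, rfl⟩
  · exact ⟨22, by omega, by omega, rfl⟩
  · exact ⟨23, by omega, by omega, rfl⟩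

set_option maxHeartbeats 1000000 in
theorem pvRanks_get?_none (f : String) (h : pvRanks.get? f = none) : f ∉ pvCands := by
  intro hmem
  have := (PySem.Dict.get?_eq_none_iff_not_mem_keys _ _).mp h
  apply this
  simp only [PySem.Dict.keys, pvRanks_items]
  fin_cases hmem <;> decide

theorem pvNodup : pvCands.Nodup := by decide

theorem pv_take_ne (c : String) (k j : Nat) (hc : c ∈ pvCands.take k) (hkj : k ≤ j)
    (hj : j < pvCands.length) : c ≠ pvCands[j] := by
  obtain ⟨m, hm, hme⟩ := List.mem_iff_getElem.mp hc
  have hmk : m < k := by rw [List.length_take] at hm; omega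
  rw [List.getElem_take] at hme
  intro heq
  have : m = j := pvNodup.getElem_inj_iff.mp (by rw [hme, heq])
  omega

theorem pv_find?_congr {p q : String → Bool} (l : List String)
    (h : ∀ c ∈ l, p c = q c) : l.find? p = l.find? q := by
  induction l with
  | nil => rfl
  | cons c cs ih =>
    have hc := h c (by simp)
    rw [List.find?, List.find?, hc]
    rcases hq : q c <;> simp [ih (fun x hx => h x (by simp [hx]))]

-- loop invariant: starting from state (pvCands[i]?, i), the fold computes the first
-- candidate of rank < i present in fields, defaulting to the state's own candidate
theorem pv_main (fields : List String) : ∀ (i : Nat), i ≤ 24 →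
    (fields.foldl pvStep (pvCands[i]?, (i : Int))).1
      = ((pvCands.take i).find? (fun c => fields.contains c)).orElse (fun _ => pvCands[i]?) := by
  induction fields with
  | nil =>
    intro i hi
    have h1 : List.find? (fun _ : String => false) (pvCands.take i) = none := by simp
    simp [h1]
  | cons f rest ih =>
    intro i hi
    rw [List.foldl_cons]
    rcases hr : pvRanks.get? f with _ | r
    · -- f has no rank: it is not a candidate at all
      have hnf : f ∉ pvCands := pvRanks_get?_none f hr
      have hstep : pvStep (pvCands[i]?, (i : Int)) f = (pvCands[i]?, (i : Int)) := by
        simp [pvStep, hr]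
      rw [hstep, ih i hi]
      congr 1
      apply pv_find?_congr
      intro c hc
      have : c ≠ f := by
        intro h; exact hnf (h ▸ List.mem_of_mem_take hc)
      simp [this]
    · obtain ⟨j, hj24, rfl, hcj⟩ := pvRanks_get?_some f _ hr
      have hlen : pvCands.length = 24 := by decide
      have hfj : pvCands[j] = f := by
        have := List.getElem?_eq_getElem (l := pvCands) (i := j) (by omega)
        rw [this] at hcj; exact (Option.some.inj hcj)
      by_cases hji : j < i
      · -- better rank found: state becomes (some f, j)
        have hstep : pvStep (pvCands[i]?, (i : Int)) f = (pvCands[j]?, (j : Int)) := by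
          simp only [pvStep, hr]
          rw [if_pos (by exact_mod_cast hji)]
          rw [hcj]
        rw [hstep, ih j (by omega)]
        -- decompose take i = take j ++ pvCands[j] :: tail
        have hjlt : j < (pvCands.take i).length := by simp [hlen]; omega
        have hdec : pvCands.take i
            = pvCands.take j ++ pvCands[j] :: (pvCands.take i).drop (j + 1) := by
          conv_lhs => rw [← List.take_append_drop j (pvCands.take i)]
          rw [List.take_take, min_eq_left (by omega), List.drop_eq_getElem_cons hjlt,
            List.getElem_take]
          rfl
        rw [hdec, List.find?_append]
        have hfind_mid : List.find? (fun c => (f :: rest).contains c)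
            (pvCands[j] :: (pvCands.take i).drop (j + 1)) = some pvCands[j] := by
          rw [List.find?]
          simp [hfj]
        have hfind_pre : List.find? (fun c => (f :: rest).contains c) (pvCands.take j)
            = List.find? (fun c => rest.contains c) (pvCands.take j) := by
          apply pv_find?_congr
          intro c hc
          have : c ≠ f := hfj ▸ pv_take_ne c j j hc (le_refl j) (by omega)
          simp [this]
        rw [hfind_mid, hfind_pre, hcj, hfj]
        rcases List.find? (fun c => rest.contains c) (pvCands.take j) <;> rfl
      · -- rank not better: state unchanged
        have hstep : pvStep (pvCands[i]?, (i : Int)) f = (pvCands[i]?, (i : Int)) := by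
          simp only [pvStep, hr]
          rw [if_neg (by exact_mod_cast hji)]
        rw [hstep, ih i hi]
        congr 1
        apply pv_find?_congr
        intro c hc
        have : c ≠ f := hfj ▸ pv_take_ne c i j hc (by omega) (by omega)
        simp [this]

-- A's loop is find?
theorem pvFindCand_eq_find? (cs fields : List String) :
    pvFindCand cs fields = cs.find? (fun c => fields.contains c) := by
  induction cs with
  | nil => rfl
  | cons c cs ih =>
    rw [pvFindCand, List.find?]
    rcases h : fields.contains c <;> simp [ih]

-- ===== VERDICT (by name: the statement is the Claim_ definition above) =====
theorem detect_name_field_spec : Claim_equal_detect_name_field := by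
  intro fields _
  unfold Spec_detect_name_field
  have h := pv_main fields 24 (le_refl 24)
  rw [show pvCands.take 24 = pvCands from rfl] at h
  rw [show pvCands[24]? = none from rfl] at h
  unfold detect_name_field detect_name_field_alt
  rw [show (pvCands.length : Int) = ((24 : Nat) : Int) from rfl, h]
  rw [pvFindCand_eq_find?, pvFindCand_eq_find?]
  rw [show pvCands = ["ADM4_AR", "ADM3_AR", "ADM2_AR", "ADM1_AR", "ADM0_AR",
      "ADM4ALT1AR", "ADM3ALT1AR", "ADM2ALT1AR", "ADM1ALT1AR", "ADM0ALT1AR",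
      "ADM4ALT2AR", "ADM3ALT2AR", "ADM2ALT2AR", "ADM1ALT2AR", "ADM0ALT2AR"] ++
      ["ADM4_EN", "ADM3_EN", "ADM2_EN", "ADM1_EN", "ADM0_EN",
        "NAME", "name", "fclass", "type"] from rfl, List.find?_append]
  rcases List.find? (fun c => fields.contains c) ["ADM4_AR", "ADM3_AR", "ADM2_AR", "ADM1_AR", "ADM0_AR",
      "ADM4ALT1AR", "ADM3ALT1AR", "ADM2ALT1AR", "ADM1ALT1AR", "ADM0ALT1AR",
      "ADM4ALT2AR", "ADM3ALT2AR", "ADM2ALT2AR", "ADM1ALT2AR", "ADM0ALT2AR"] <;>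
    rcases List.find? (fun c => fields.contains c) ["ADM4_EN", "ADM3_EN", "ADM2_EN", "ADM1_EN", "ADM0_EN",
        "NAME", "name", "fclass", "type"] <;> rfl
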